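-- pv_equiv track=rewrite | github.com/GenryEden/kpolyakovName | 2446.py | f
-- ===== SOURCE A (Python) =====
-- def f(x):
-- 	a = 0
-- 	b = 1
-- 	while x > 0:
-- 		if x % 2 > 0:
-- 			a += x % 8
-- 		else:
-- 			b *= x % 8
-- 		x //= 8
-- 	return a, b
-- ===== SOURCE B (Python) =====
-- def f(x):
--     if x <= 0:
--         return 0, 1
--     a, b = 0, 1
--     for c in oct(x)[2:]:
--         d = ord(c) - 48
--         if c in '1357':
--             a += d
--         else:
--             b *= d
--     return a, b
-- ===== Notes on version B (the rewrite author's own statement) =====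
-- stated objective: alternative
-- what changed: B formats x as an octal string with oct() and walks its characters most-significant-first, classifying each digit character by membership in the string of odd octal digit characters and converting it back with ord, instead of A's arithmetic least-significant-first loop that tests the parity of x while repeatedly dividing; correctness relies on commutativity of the sum and product.
import Mathlib
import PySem

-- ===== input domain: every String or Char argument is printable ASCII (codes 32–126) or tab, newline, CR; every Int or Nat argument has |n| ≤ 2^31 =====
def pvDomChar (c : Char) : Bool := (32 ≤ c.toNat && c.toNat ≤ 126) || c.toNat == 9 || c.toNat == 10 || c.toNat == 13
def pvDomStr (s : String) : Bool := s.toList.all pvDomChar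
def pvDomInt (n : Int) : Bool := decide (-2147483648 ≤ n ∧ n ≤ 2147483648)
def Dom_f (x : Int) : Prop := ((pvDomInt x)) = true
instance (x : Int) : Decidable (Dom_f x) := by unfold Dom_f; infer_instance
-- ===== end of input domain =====

-- B walks the octal string oct(x) most-significant-first classifying digit characters, instead of A's arithmetic least-significant-first division loop (alternative algorithm, same cost).


-- ===== PORT A =====
-- while x > 0: if x % 2 > 0: a += x % 8 else: b *= x % 8; x //= 8
def fLoop (x a b : Int) : Int × Int :=
  if h : x > 0 then
    fLoop (PySem.Int.floordiv x 8)
      (if PySem.Int.mod x 2 > 0 then a + PySem.Int.mod x 8 else a)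
      (if PySem.Int.mod x 2 > 0 then b else b * PySem.Int.mod x 8)
  else (a, b)
termination_by x.toNat
decreasing_by
  have h8 : PySem.Int.floordiv x 8 = x / 8 := PySem.Int.floordiv_eq_ediv_of_pos (by omega)
  rw [h8]; omega

def f (x : Int) : Int × Int := fLoop x 0 1

-- ===== PORT B =====
-- oct(x)[2:] for x > 0: the octal digit characters of x, most significant first
def octChars (x : Int) : List Char :=
  if h : x > 0 then
    octChars (PySem.Int.floordiv x 8) ++ [Char.ofNat (48 + (PySem.Int.mod x 8).toNat)]
  else []
termination_by x.toNat
decreasing_by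
  have h8 : PySem.Int.floordiv x 8 = x / 8 := PySem.Int.floordiv_eq_ediv_of_pos (by omega)
  rw [h8]; omega

-- one iteration of B's for loop: d = ord(c) - 48; if c in '1357': a += d else: b *= d
def fStep (p : Int × Int) (c : Char) : Int × Int :=
  let d : Int := (c.toNat : Int) - 48
  if ['1', '3', '5', '7'].contains c then (p.1 + d, p.2) else (p.1, p.2 * d)

def f_alt (x : Int) : Int × Int :=
  if x ≤ 0 then (0, 1)
  else (octChars x).foldl fStep (0, 1)

-- ===== PRECONDITION & SPEC =====
def Spec_f (x : Int) (out : Int × Int) : Prop := out = f_alt x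
instance (x : Int) (out : Int × Int) : Decidable (Spec_f x out) := by unfold Spec_f; infer_instance

-- ===== CLAIM (what is proved, stated in full; the proofs are below) =====
def Claim_equal_f : Prop := ∀ (x : Int), Dom_f x → Spec_f x (f x)

-- ===== LEMMAS AND PROOFS =====

-- the accumulators factor out of B's fold (a only receives additions, b only multiplications)
lemma fStep_factor (a b : Int) (c : Char) :
    fStep (a, b) c = (a + (fStep (0, 1) c).1, b * (fStep (0, 1) c).2) := by
  unfold fStep
  split_ifs <;> simp

lemma foldl_fStep_factor (l : List Char) (a b : Int) :
    l.foldl fStep (a, b) = (a + (l.foldl fStep (0, 1)).1, b * (l.foldl fStep (0, 1)).2) := by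
  induction l generalizing a b with
  | nil => simp
  | cons c l ih =>
    simp only [List.foldl_cons]
    rw [fStep_factor, ih, @ih (fStep (0, 1) c).1 (fStep (0, 1) c).2]
    simp [Prod.ext_iff]
    constructor <;> ring

-- A's parity test on x agrees with the parity of the digit x % 8
lemma mod8_parity (x : Int) : PySem.Int.mod (PySem.Int.mod x 8) 2 = PySem.Int.mod x 2 := by
  rw [PySem.Int.mod_eq_emod_of_pos (a := x) (by norm_num),
      PySem.Int.mod_eq_emod_of_pos (by norm_num),
      PySem.Int.mod_eq_emod_of_pos (by norm_num)]
  exact Int.emod_emod_of_dvd x (by norm_num)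

-- B's classification of the least significant digit's character equals A's arithmetic step
lemma fStep_last (x : Int) (p : Int × Int) :
    fStep p (Char.ofNat (48 + (PySem.Int.mod x 8).toNat)) =
      (if PySem.Int.mod x 2 > 0 then (p.1 + PySem.Int.mod x 8, p.2)
       else (p.1, p.2 * PySem.Int.mod x 8)) := by
  have h8 : PySem.Int.mod x 8 = x % 8 := PySem.Int.mod_eq_emod_of_pos (by norm_num)
  have h2 : PySem.Int.mod x 2 = (PySem.Int.mod x 8) % 2 := by
    rw [← mod8_parity x, PySem.Int.mod_eq_emod_of_pos (by norm_num)]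
  rw [h2, h8]
  have hcase : x % 8 = 0 ∨ x % 8 = 1 ∨ x % 8 = 2 ∨ x % 8 = 3 ∨ x % 8 = 4 ∨ x % 8 = 5 ∨ x % 8 = 6 ∨ x % 8 = 7 := by omega
  rcases hcase with h'|h'|h'|h'|h'|h'|h'|h' <;> rw [h'] <;>
    simp [fStep, show Char.ofNat 48 = '0' from by decide, show Char.ofNat 49 = '1' from by decide, show Char.ofNat 50 = '2' from by decide, show Char.ofNat 51 = '3' from by decide, show Char.ofNat 52 = '4' from by decide, show Char.ofNat 53 = '5' from by decide, show Char.ofNat 54 = '6' from by decide, show Char.ofNat 55 = '7' from by decide, show (('1':Char).toNat : Int) = 49 from by decide, show (('2':Char).toNat : Int) = 50 from by decide, show (('3':Char).toNat : Int) = 51 from by decide, show (('4':Char).toNat : Int) = 52 from by decide, show (('5':Char).toNat : Int) = 53 from by decide, show (('6':Char).toNat : Int) = 54 from by decide, show (('7':Char).toNat : Int) = 55 from by decide] <;> norm_num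

lemma loop_eq_fold : ∀ (n : Nat) (x a b : Int), x.toNat ≤ n →
    fLoop x a b = (octChars x).foldl fStep (a, b) := by
  intro n
  induction n with
  | zero =>
    intro x a b hx
    have hx0 : ¬ x > 0 := by omega
    rw [fLoop, octChars]
    simp [hx0]
  | succ n ih =>
    intro x a b hx
    by_cases h : x > 0
    · have h8 : PySem.Int.floordiv x 8 = x / 8 := PySem.Int.floordiv_eq_ediv_of_pos (by norm_num)
      have hlt : (PySem.Int.floordiv x 8).toNat ≤ n := by rw [h8]; omega
      rw [fLoop, octChars]
      simp only [h, dif_pos]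
      rw [ih _ _ _ hlt, List.foldl_append, List.foldl_cons, List.foldl_nil,
          foldl_fStep_factor, foldl_fStep_factor (octChars (PySem.Int.floordiv x 8)) a b,
          fStep_last]
      have hm2 : PySem.Int.mod x 2 = x % 2 := PySem.Int.mod_eq_emod_of_pos (by norm_num)
      rw [hm2]
      by_cases ho : 0 < x % 2 <;> simp [ho, Prod.ext_iff] <;> (try constructor) <;> ring
    · rw [fLoop, octChars]; simp [h]

-- ===== VERDICT (by name: the statement is the Claim_ definition above) =====
theorem f_spec : Claim_equal_f := by
  intro x _
  unfold Spec_f f f_alt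
  by_cases hx : x ≤ 0
  · have h0 : ¬ x > 0 := by omega
    rw [fLoop]
    simp [hx, h0]
  · simp only [hx, if_false]
    exact loop_eq_fold x.toNat x 0 1 (le_refl _)
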